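-- pv_equiv track=rewrite | github.com/ctb/pygr-align | clustalw/Clustalw_NLMSA.py | build_interval_list
-- ===== SOURCE A (Python) =====
-- def build_interval_list(a, b):
--     """
--     Hacky code to extract all ungapped aligned subintervals from a
--     pair of aligned sequences.
--     """
--     interval_list = []
--
--     a_start = None
--     b_start = None
--
--     a_count = b_count = 0
--     for i in range(0, len(a)):
--         if a[i] == '-' or b[i] == '-':
--             if a_start is not None:           # want to end at i-1
--                 interval_list.append((a_start, a_count, b_start, b_count))
--
--                 a_start = b_start = None
--         else:
--             if a_start is None:
--                 a_start = a_count
--                 b_start = b_count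
--
--         if a[i] != '-':
--             a_count += 1
--         if b[i] != '-':
--             b_count += 1
--
--     if a_start is not None:
--         interval_list.append((a_start, a_count, b_start, b_count))
--
--     assert a_count == len(a.replace('-', ''))
--     assert b_count == len(b.replace('-', ''))
--
--     return interval_list
-- ===== SOURCE B (Python) =====
-- def build_interval_list(a, b):
--     """
--     Extract all ungapped aligned subintervals from a pair of aligned
--     sequences, as a two-pointer scan that consumes each ungapped run whole.
--     """
--     interval_list = []
--     n = len(a)
--     a_count = b_count = 0
--     i = 0
--     while i < n:
--         if a[i] == '-' or b[i] == '-':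
--             if a[i] != '-':
--                 a_count += 1
--             if b[i] != '-':
--                 b_count += 1
--             i += 1
--         else:
--             a_start, b_start = a_count, b_count
--             while i < n and a[i] != '-' and b[i] != '-':
--                 a_count += 1
--                 b_count += 1
--                 i += 1
--             interval_list.append((a_start, a_count, b_start, b_count))
--
--     assert a_count == len(a.replace('-', ''))
--     assert b_count == len(b.replace('-', ''))
--
--     return interval_list
-- ===== Notes on version B (the rewrite author's own statement) =====
-- stated objective: alternative
-- what changed: A carries Option start markers (a_start/b_start None-or-set) across one uniform per-index loop; B is a two-pointer scan with no start state: an outer loop steps over gapped columns and, on a run start, an inner loop consumes the whole ungapped run and emits its interval at once.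
import Mathlib
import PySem

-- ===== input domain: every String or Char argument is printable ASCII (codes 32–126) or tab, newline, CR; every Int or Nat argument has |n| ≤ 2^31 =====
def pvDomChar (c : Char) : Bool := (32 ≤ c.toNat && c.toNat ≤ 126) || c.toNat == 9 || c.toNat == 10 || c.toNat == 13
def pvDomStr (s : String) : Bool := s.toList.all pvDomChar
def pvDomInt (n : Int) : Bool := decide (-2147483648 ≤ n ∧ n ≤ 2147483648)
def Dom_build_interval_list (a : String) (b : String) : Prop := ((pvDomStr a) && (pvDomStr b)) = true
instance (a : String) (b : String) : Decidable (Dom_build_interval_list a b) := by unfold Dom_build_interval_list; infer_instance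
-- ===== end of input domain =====

-- B replaces A's one-pass state machine (Option start markers carried across a uniform
-- index loop) by a two-pointer scan that consumes each ungapped run whole; same O(n) cost,
-- objective: alternative decomposition.

-- ===== PORT A =====
-- A's for-loop over range(len(a)), step for step; fuel = number of remaining iterations
-- (a pure totality guard: it starts at len(a) and ticks down once per iteration).
-- A's a_start/b_start are always both None or both set; carried as one Option pair.
-- Python's b[i] raises IndexError when i ≥ len(b); the port reads ' ' there, and
-- Pre_build_interval_list excludes exactly those inputs.
def loopA (la lb : List Char) (fuel i : Nat) (start : Option (Int × Int))
    (ac bc : Int) (acc : List (Int × Int × Int × Int)) : List (Int × Int × Int × Int) :=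
  match fuel with
  | 0 =>
    match start with
    | some (sa, sb) => acc ++ [(sa, ac, sb, bc)]
    | none          => acc
  | fuel + 1 =>
    let ca := la.getD i ' '
    let cb := lb.getD i ' '
    let ac' := if ca ≠ '-' then ac + 1 else ac
    let bc' := if cb ≠ '-' then bc + 1 else bc
    if ca = '-' ∨ cb = '-' then
      match start with
      | some (sa, sb) => loopA la lb fuel (i + 1) none ac' bc' (acc ++ [(sa, ac, sb, bc)])
      | none          => loopA la lb fuel (i + 1) none ac' bc' acc
    else
      -- "if a_start is None: a_start = a_count; b_start = b_count"
      loopA la lb fuel (i + 1) (some (start.getD (ac, bc))) ac' bc' acc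

def build_interval_list (a : String) (b : String) : List (Int × Int × Int × Int) :=
  loopA a.toList b.toList a.toList.length 0 none 0 0 []

-- ===== PORT B =====
-- Source B's outer while loop (outerC) and inner run-consuming while loop (innerC);
-- fuel = len(a) - i, the remaining columns (a pure totality guard).
-- When the inner loop stops at a gapped column, control returns to the outer loop which
-- handles that very column; innerC's run-end branch performs exactly that outer-loop step.
-- outerC's run branch enters the inner loop after its (certain) first iteration.
mutual
def outerC (la lb : List Char) (fuel i : Nat) (ac bc : Int)
    (out : List (Int × Int × Int × Int)) : List (Int × Int × Int × Int) :=
  match fuel with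
  | 0 => out
  | fuel + 1 =>
    if la.getD i ' ' = '-' ∨ lb.getD i ' ' = '-' then
      outerC la lb fuel (i + 1) (if la.getD i ' ' ≠ '-' then ac + 1 else ac)
        (if lb.getD i ' ' ≠ '-' then bc + 1 else bc) out
    else
      innerC la lb fuel (i + 1) ac bc (ac + 1) (bc + 1) out

def innerC (la lb : List Char) (fuel i : Nat) (sa sb ac bc : Int)
    (out : List (Int × Int × Int × Int)) : List (Int × Int × Int × Int) :=
  match fuel with
  | 0 => out ++ [(sa, ac, sb, bc)]
  | fuel + 1 =>
    if la.getD i ' ' ≠ '-' ∧ lb.getD i ' ' ≠ '-' then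
      innerC la lb fuel (i + 1) sa sb (ac + 1) (bc + 1) out
    else
      outerC la lb fuel (i + 1) (if la.getD i ' ' ≠ '-' then ac + 1 else ac)
        (if lb.getD i ' ' ≠ '-' then bc + 1 else bc) (out ++ [(sa, ac, sb, bc)])
end

def build_interval_list_alt (a : String) (b : String) : List (Int × Int × Int × Int) :=
  outerC a.toList b.toList a.toList.length 0 0 0 []

-- ===== PRECONDITION & SPEC =====
-- Exactly the inputs where Python A returns: len(a) ≤ len(b) (else b[i] raises IndexError)
-- and every char of b past len(a) is '-' (else the b_count assertion fails).
def Pre_build_interval_list (a : String) (b : String) : Prop :=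
  a.toList.length ≤ b.toList.length ∧ (b.toList.drop a.toList.length).all (· == '-') = true
instance (a : String) (b : String) : Decidable (Pre_build_interval_list a b) := by
  unfold Pre_build_interval_list; infer_instance

def pvWitness_build_interval_list : String × String := ("AC-GT-A", "A-CG-TA")

def Spec_build_interval_list (a : String) (b : String) (out : List (Int × Int × Int × Int)) : Prop := out = build_interval_list_alt a b
instance (a : String) (b : String) (out : List (Int × Int × Int × Int)) : Decidable (Spec_build_interval_list a b out) := by unfold Spec_build_interval_list; infer_instance

-- ===== CLAIM (what is proved, stated in full; the proofs are below) =====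
def Claim_equal_build_interval_list : Prop := ∀ (a : String) (b : String), Dom_build_interval_list a b → Pre_build_interval_list a b → Spec_build_interval_list a b (build_interval_list a b)

-- ===== LEMMAS AND PROOFS =====

-- Core invariant, by induction on the fuel, one conjunct per run state: with an open run
-- (some start) A's loop equals B's inner loop; with no open run it equals B's outer loop.
theorem loopA_eq (la lb : List Char) : ∀ fuel : Nat,
    ((∀ (i : Nat) (sa sb ac bc : Int) (acc : List (Int × Int × Int × Int)),
        loopA la lb fuel i (some (sa, sb)) ac bc acc = innerC la lb fuel i sa sb ac bc acc) ∧
     (∀ (i : Nat) (ac bc : Int) (acc : List (Int × Int × Int × Int)),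
        loopA la lb fuel i none ac bc acc = outerC la lb fuel i ac bc acc)) := by
  intro fuel
  induction fuel with
  | zero => exact ⟨fun i sa sb ac bc acc => rfl, fun i ac bc acc => rfl⟩
  | succ fuel ih =>
    constructor
    · intro i sa sb ac bc acc
      by_cases hg : la.getD i ' ' = '-' ∨ lb.getD i ' ' = '-'
      · rw [loopA]
        simp only [if_pos hg]
        rw [ih.2]
        rw [innerC, if_neg (show ¬(la.getD i ' ' ≠ '-' ∧ lb.getD i ' ' ≠ '-') by
          intro h; exact hg.elim (fun h1 => h.1 h1) (fun h1 => h.2 h1))]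
      · have ha := (not_or.mp hg).1
        have hb := (not_or.mp hg).2
        rw [loopA]
        simp only [if_neg hg, Option.getD_some, if_pos ha, if_pos hb]
        rw [ih.1]
        rw [innerC, if_pos ⟨ha, hb⟩]
    · intro i ac bc acc
      by_cases hg : la.getD i ' ' = '-' ∨ lb.getD i ' ' = '-'
      · rw [loopA]
        simp only [if_pos hg]
        rw [ih.2]
        rw [outerC, if_pos hg]
      · have ha := (not_or.mp hg).1
        have hb := (not_or.mp hg).2
        rw [loopA]
        simp only [if_neg hg, Option.getD_none, if_pos ha, if_pos hb]
        rw [ih.1]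
        rw [outerC, if_neg hg]

-- ===== VERDICT (by name: the statement is the Claim_ definition above) =====
theorem build_interval_list_spec : Claim_equal_build_interval_list := by
  intro a b _ _
  unfold Spec_build_interval_list build_interval_list build_interval_list_alt
  exact (loopA_eq a.toList b.toList a.toList.length).2 0 0 0 []
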